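-- pv_equiv track=rewrite | github.com/seclinch/sigchiproceedings-cookiecutter | jinja2_extensions/paper_title.py | short_title
-- ===== SOURCE A (Python) =====
-- import string
--
-- def short_title(value):
--     """Return the portion of a value string that preceeds the first
--      occurance of `breaking` punctuation within that string. Breaking
--      punctuation excludes quotes (which are removed from the string).
--
--     >>> short_title("Hello! My name is 'Bob'.")
--     'Hello'
--     >>> short_title("One option remains: press on.")
--     'One option remains'
--     >>> short_title("How High?")
--     'How High'
--     >>> short_title("And this one has no punctuation at all")
--     'And this one has no punctuation at all'
--     """
--
--     value = value.replace('"', '').replace("''", '')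
--     punctuation_indices = sorted([
--         value.find(c) for c in string.punctuation if value.find(c) > -1
--     ])
--     for punctuation_index in punctuation_indices:
--         value = value[:punctuation_index]
--         break
--     return value
-- ===== SOURCE B (Python) =====
-- import string
--
-- def short_title(value):
--     value = value.replace('"', '').replace("''", '')
--     for i, ch in enumerate(value):
--         if ch in string.punctuation:
--             return value[:i]
--     return value
-- ===== Notes on version B (the rewrite author's own statement) =====
-- stated objective: simpler
-- what changed: Replaced the 32 find scans over the whole string plus sort-and-take-min with a single left-to-right pass over the string that truncates at the first punctuation character.
import Mathlib
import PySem

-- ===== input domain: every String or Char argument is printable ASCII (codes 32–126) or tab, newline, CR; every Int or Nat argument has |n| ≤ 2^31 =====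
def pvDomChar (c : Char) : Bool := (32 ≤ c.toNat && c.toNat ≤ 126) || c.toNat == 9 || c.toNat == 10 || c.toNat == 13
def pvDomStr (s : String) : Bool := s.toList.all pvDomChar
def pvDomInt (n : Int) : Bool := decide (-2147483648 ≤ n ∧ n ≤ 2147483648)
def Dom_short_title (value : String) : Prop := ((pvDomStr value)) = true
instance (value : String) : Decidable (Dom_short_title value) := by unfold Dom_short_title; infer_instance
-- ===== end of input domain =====

-- B replaces A's 32 whole-string .find scans + sort + take-first with a single
-- left-to-right pass that truncates at the first punctuation character (objective: simpler).

-- string.punctuation, shared context of both programs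
def pvPunct : List Char := "!\"#$%&'()*+,-./:;<=>?@[\\]^_`{|}~".toList

-- ===== PORT A =====
def short_title (value : String) : String :=
  let v := PySem.Str.replace (PySem.Str.replace value "\"" "") "''" ""
  let punctuation_indices : List Int :=
    PySem.List.sorted
      ((pvPunct.filter (fun c => -1 < PySem.Str.find v (String.ofList [c]))).map
        (fun c => PySem.Str.find v (String.ofList [c])))
      (fun x => x) false
  -- 'for punctuation_index in punctuation_indices: value = value[:punctuation_index]; break'
  match punctuation_indices with
  | [] => v
  | punctuation_index :: _ => PySem.Str.slice v none (some punctuation_index)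

-- ===== PORT B =====
-- 'for i, ch in enumerate(value): if ch in string.punctuation: return value[:i]'
def pvScanB (v : List Char) (i : Nat) : List Char → List Char
  | [] => v
  | ch :: rest => if ch ∈ pvPunct then v.take i else pvScanB v (i + 1) rest

def short_title_alt (value : String) : String :=
  let v := PySem.Str.replace (PySem.Str.replace value "\"" "") "''" ""
  String.ofList (pvScanB v.toList 0 v.toList)

-- ===== PRECONDITION & SPEC =====
def Spec_short_title (value : String) (out : String) : Prop := out = short_title_alt value
instance (value : String) (out : String) : Decidable (Spec_short_title value out) := by unfold Spec_short_title; infer_instance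

-- ===== CLAIM (what is proved, stated in full; the proofs are below) =====
def Claim_equal_short_title : Prop := ∀ (value : String), Dom_short_title value → Spec_short_title value (short_title value)

-- ===== LEMMAS AND PROOFS =====

theorem pvScanB_eq (v : List Char) (i : Nat) (t : List Char) :
    pvScanB v i t = match t.findIdx? (fun c => decide (c ∈ pvPunct)) with
      | some k => v.take (i + k)
      | none => v := by
  induction t generalizing i with
  | nil => simp [pvScanB]
  | cons ch rest ih =>
    rw [List.findIdx?_cons]
    by_cases h : ch ∈ pvPunct
    · simp [pvScanB, h]
    · simp only [pvScanB, h, if_false, decide_eq_true_eq]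
      rw [ih (i + 1)]
      cases hr : rest.findIdx? (fun c => decide (c ∈ pvPunct)) with
      | none => simp
      | some k => simp; omega

-- single-char find characterisation: [c] is a prefix of s.drop i ↔ s[i]? = some c
theorem singleton_prefix_drop {s : List Char} {c : Char} {i : Nat} :
    [c] <+: s.drop i ↔ s[i]? = some c := by
  rw [← List.head?_drop]
  cases s.drop i <;> simp [List.cons_prefix_cons, eq_comm]

-- the core fact, on the cleaned string s: the head of A's sorted list of find
-- results is exactly the index of the first punctuation character
theorem core_eq (s : List Char) :
    (match PySem.List.sorted
        ((pvPunct.filter (fun c => -1 < PySem.Chars.find s [c])).map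
          (fun c => PySem.Chars.find s [c])) (fun x => x) false with
      | [] => s
      | i :: _ => PySem.List.slice s none (some i)) = pvScanB s 0 s := by
  rw [pvScanB_eq]
  cases hf : s.findIdx? (fun c => decide (c ∈ pvPunct)) with
  | none =>
    rw [List.findIdx?_eq_none_iff] at hf
    have hfilter : pvPunct.filter (fun c => -1 < PySem.Chars.find s [c]) = [] := by
      rw [List.filter_eq_nil_iff]
      intro c hc
      have : PySem.Chars.find s [c] = -1 := by
        rw [PySem.Chars.find_eq_neg_one_iff]
        intro hinf
        obtain ⟨l, r, hlr⟩ := hinf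
        have hcs : c ∈ s := by rw [← hlr]; simp
        exact (by simpa using hf c hcs : c ∉ pvPunct) hc
      simp [this]
    simp [hfilter, PySem.List.sorted]
  | some j =>
    obtain ⟨hj, hpj, hmin⟩ := List.findIdx?_eq_some_iff_getElem.mp hf
    simp only [decide_eq_true_eq] at hpj hmin
    -- find s [s[j]] = j
    have hpre_j : [s[j]] <+: s.drop j := singleton_prefix_drop.mpr (by simp)
    have hinf : [s[j]] <:+: s := hpre_j.isInfix.trans (s.drop_suffix j).isInfix
    have h0 : (0:Int) ≤ PySem.Chars.find s [s[j]] := (PySem.Chars.find_nonneg_iff s [s[j]]).mpr hinf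
    obtain ⟨hfp, hfmin⟩ := PySem.Chars.find_spec h0
    have hle : (PySem.Chars.find s [s[j]]).toNat ≤ j := by
      by_contra hlt
      exact hfmin j (by omega) hpre_j
    have hge : j ≤ (PySem.Chars.find s [s[j]]).toNat := by
      have := singleton_prefix_drop.mp hfp
      have hjl : (PySem.Chars.find s [s[j]]).toNat < s.length := (List.getElem?_eq_some_iff.mp this).1
      have heq : s[(PySem.Chars.find s [s[j]]).toNat] = s[j] := by
        have := (List.getElem?_eq_some_iff.mp this).2; simpa using this
      by_contra hlt
      exact hmin (PySem.Chars.find s [s[j]]).toNat (by omega) (by rw [heq]; exact hpj)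
    have hfind_j : PySem.Chars.find s [s[j]] = (j : Int) := by omega
    -- (j : Int) is in the find list, and bounds every element from below
    have hmem : (j:Int) ∈ (pvPunct.filter (fun c => -1 < PySem.Chars.find s [c])).map
        (fun c => PySem.Chars.find s [c]) := by
      refine List.mem_map.mpr ⟨s[j], List.mem_filter.mpr ⟨hpj, by simp [hfind_j]; omega⟩, hfind_j⟩
    have hlb : ∀ m ∈ (pvPunct.filter (fun c => -1 < PySem.Chars.find s [c])).map
        (fun c => PySem.Chars.find s [c]), (j:Int) ≤ m := by
      intro m hm
      obtain ⟨c, hc, rfl⟩ := List.mem_map.mp hm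
      obtain ⟨hcp, hcpos⟩ := List.mem_filter.mp hc
      have h0c : (0:Int) ≤ PySem.Chars.find s [c] := by
        simpa using hcpos
      obtain ⟨hcpre, _⟩ := PySem.Chars.find_spec h0c
      have hcget := singleton_prefix_drop.mp hcpre
      have hcl : (PySem.Chars.find s [c]).toNat < s.length := (List.getElem?_eq_some_iff.mp hcget).1
      have hceq : s[(PySem.Chars.find s [c]).toNat] = c := by
        have := (List.getElem?_eq_some_iff.mp hcget).2; simpa using this
      by_contra hlt
      refine hmin (PySem.Chars.find s [c]).toNat (by omega) ?_
      rw [hceq]; simpa using hcp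
    cases hs : PySem.List.sorted ((pvPunct.filter (fun c => -1 < PySem.Chars.find s [c])).map
        (fun c => PySem.Chars.find s [c])) (fun x => x) false with
    | nil =>
      rw [PySem.List.sorted_eq_nil_iff] at hs
      simp [hs] at hmem
    | cons m rest =>
      have h1 : m ≤ (j:Int) := PySem.List.key_head_sorted_le _ _ hs _ hmem
      have h2 : (j:Int) ≤ m := by
        refine hlb m ?_
        rw [← PySem.List.mem_sorted _ (fun x => x) false, hs]
        simp
      have hmj : m = (j:Int) := le_antisymm h1 h2
      subst hmj
      simp [PySem.List.slice_to_natCast]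

theorem short_title_spec : Claim_equal_short_title := by
  intro value _
  unfold Spec_short_title short_title short_title_alt
  refine String.toList_inj.mp ?_
  simp only [PySem.Str.find_eq, String.toList_ofList]
  rw [← core_eq]
  cases PySem.List.sorted
      ((pvPunct.filter (fun c => -1 < PySem.Chars.find
          (PySem.Str.replace (PySem.Str.replace value "\"" "") "''" "").toList [c])).map
        (fun c => PySem.Chars.find
          (PySem.Str.replace (PySem.Str.replace value "\"" "") "''" "").toList [c]))
      (fun x => x) false with
  | nil => simp
  | cons i rest => simp [PySem.Str.toList_slice]
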